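-- pv_equiv track=rewrite | github.com/e1630m/binary-search | py/longest_interval_containing_one_number.py | solve
-- ===== SOURCE A (Python) =====
-- def solve(nums):
--     nums = sorted(nums + [0] + [100001])
--     round = len(nums) - 1
--     longest = 0
--     for i in range(1, round):
--         lo, hi = nums[i - 1] + 1, nums[i + 1] - 1
--         longest = max(longest, hi - lo + 1)
--     return longest
-- ===== SOURCE B (Python) =====
-- def solve(nums):
--     count = {}
--     for v in nums + [0, 100001]:
--         count[v] = count.get(v, 0) + 1
--     u = sorted(count)
--     best = 0
--     for j in range(len(u) - 1):
--         x, y = u[j], u[j + 1]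
--         if count[x] > 1 or count[y] > 1:
--             best = max(best, y - x - 1)
--         if count[y] == 1 and j + 2 < len(u):
--             best = max(best, u[j + 2] - x - 1)
--     return best
-- ===== Notes on version B (the rewrite author's own statement) =====
-- stated objective: alternative
-- what changed: Instead of scanning three-element windows of the fully sorted multiset, B builds a dict of value counts in one pass, sorts only the distinct values, and scans adjacent distinct pairs, using count>1 to pick gap candidates and count==1 to merge the two gaps around a unique value.
import Mathlib
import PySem

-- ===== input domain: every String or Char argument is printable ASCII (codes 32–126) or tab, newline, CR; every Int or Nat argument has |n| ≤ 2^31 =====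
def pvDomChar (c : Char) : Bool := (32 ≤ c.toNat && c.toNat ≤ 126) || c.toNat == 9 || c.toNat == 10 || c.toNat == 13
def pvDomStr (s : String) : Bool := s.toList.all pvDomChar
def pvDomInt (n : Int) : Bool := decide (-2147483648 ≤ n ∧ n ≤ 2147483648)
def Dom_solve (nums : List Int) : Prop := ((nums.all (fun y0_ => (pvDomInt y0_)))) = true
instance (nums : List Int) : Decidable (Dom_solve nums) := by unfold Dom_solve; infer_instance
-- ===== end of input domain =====

-- B (objective: alternative) replaces A's window scan over the fully sorted multiset
-- (duplicates included) by a counting dict built in one pass, a sort of the DISTINCT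
-- values only, and a scan over adjacent distinct values driven by the counts.

-- ===== PORT A =====
-- literal port of A: sort nums+[0]+[100001], loop i over range(1, len-1),
-- longest = max(longest, nums[i+1]-1 - (nums[i-1]+1) + 1); indices are always in
-- range, so nums[i±1] is ported as pyGetD with default 0 (exact here).
def solve (nums : List Int) : Int :=
  let a := PySem.List.sorted (nums ++ [0] ++ [100001]) (fun x => x) false
  let round : Int := (a.length : Int) - 1
  (PySem.List.pyRange 1 round 1).foldl
    (fun longest i =>
      let lo := PySem.List.pyGetD a (i - 1) 0 + 1
      let hi := PySem.List.pyGetD a (i + 1) 0 - 1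
      max longest (hi - lo + 1)) 0

-- ===== PORT B =====
-- literal port of Source B: count = {} filled with count.get(v,0)+1 over nums+[0,100001];
-- u = sorted(count) (the keys); loop j over range(len(u)-1) with the two conditional
-- max-updates. count[x]/count[y] are lookups of keys known to be present, so they are
-- ported as getD _ 0 (exact here); u[j], u[j+1], u[j+2] as pyGetD _ _ 0 (each read
-- only at an in-range index, so exact).
def solve_alt (nums : List Int) : Int :=
  let count : PySem.Dict Int Int :=
    (nums ++ [0, 100001]).foldl (fun d v => d.insert v (d.getD v 0 + 1)) PySem.Dict.empty
  let u := PySem.List.sorted count.keys (fun x => x) false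
  (PySem.List.pyRange 0 ((u.length : Int) - 1) 1).foldl
    (fun best j =>
      let x := PySem.List.pyGetD u j 0
      let y := PySem.List.pyGetD u (j + 1) 0
      let best1 := if 1 < count.getD x 0 ∨ 1 < count.getD y 0 then max best (y - x - 1) else best
      if count.getD y 0 = 1 ∧ j + 2 < (u.length : Int) then
        max best1 (PySem.List.pyGetD u (j + 2) 0 - x - 1)
      else best1) 0

-- ===== PRECONDITION & SPEC =====
def Spec_solve (nums : List Int) (out : Int) : Prop := out = solve_alt nums
instance (nums : List Int) (out : Int) : Decidable (Spec_solve nums out) := by unfold Spec_solve; infer_instance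

-- ===== CLAIM (what is proved, stated in full; the proofs are below) =====
def Claim_equal_solve : Prop := ∀ (nums : List Int), Dom_solve nums → Spec_solve nums (solve nums)

-- ===== LEMMAS AND PROOFS =====

-- the list of A's window candidates a[i+1] - a[i-1] - 1, structurally
def windows : List Int → List Int
  | x :: y :: z :: t => (z - x - 1) :: windows (y :: z :: t)
  | _ => []

-- the list of B's candidates over the distinct sorted values u, with count function c
def bscan (c : Int → Int) : List Int → List Int
  | x :: y :: t =>
      (if 1 < c x ∨ 1 < c y then [y - x - 1] else []) ++
      (if c y = 1 then (match t with | z :: _ => [z - x - 1] | [] => []) else []) ++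
      bscan c (y :: t)
  | _ => []

def max0 (l : List Int) : Int := l.foldl max 0

def flatC (c : Int → Int) (u : List Int) : List Int :=
  u.flatMap (fun v => List.replicate (c v).toNat v)

theorem bscan_cons (c : Int → Int) (x y : Int) (t : List Int) :
    bscan c (x :: y :: t) =
      (if 1 < c x ∨ 1 < c y then [y - x - 1] else []) ++
      (if c y = 1 then (match t with | z :: _ => [z - x - 1] | [] => []) else []) ++
      bscan c (y :: t) := rfl

theorem flatC_cons (c : Int → Int) (w : Int) (u : List Int) :
    flatC c (w :: u) = List.replicate (c w).toNat w ++ flatC c u := rfl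

theorem windows_length (a : List Int) : (windows a).length = a.length - 2 := by
  match a with
  | [] => rfl
  | [_] => rfl
  | [_, _] => rfl
  | x :: y :: z :: t =>
    simp [windows, windows_length (y :: z :: t)]

theorem windows_getElem (a : List Int) (k : Nat) (h : k < (windows a).length) :
    (windows a)[k] =
      a[k + 2]'(by have := windows_length a; omega) - a[k]'(by have := windows_length a; omega) - 1 := by
  match a, k with
  | x :: y :: z :: t, 0 => simp [windows]
  | x :: y :: z :: t, k + 1 =>
    have h' : k < (windows (y :: z :: t)).length := by
      simpa [windows] using h
    have := windows_getElem (y :: z :: t) k h'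
    simp [windows, this]

theorem max0_nonneg (l : List Int) : 0 ≤ max0 l := (PySem.List.le_foldl_max l 0).1

theorem foldl_max_max (l : List Int) (a b : Int) :
    l.foldl max (max a b) = max a (l.foldl max b) := by
  induction l generalizing b with
  | nil => rfl
  | cons x t ih => simp only [List.foldl_cons, max_assoc, ih]

theorem max0_append (l1 l2 : List Int) : max0 (l1 ++ l2) = max (max0 l1) (max0 l2) := by
  unfold max0
  rw [List.foldl_append]
  conv_lhs => rw [show List.foldl max 0 l1 = max (List.foldl max 0 l1) 0 from
    (max_eq_left (max0_nonneg l1)).symm]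
  exact foldl_max_max l2 (List.foldl max 0 l1) 0

theorem max0_nil : max0 ([] : List Int) = 0 := rfl

theorem max0_cons (e : Int) (l : List Int) : max0 (e :: l) = max (max 0 e) (max0 l) := by
  rw [← List.singleton_append, max0_append]
  rfl

theorem max0_neg_one_cons (l : List Int) : max0 ((-1) :: l) = max0 l := by
  simp [max0]

-- windows past a duplicated head: plain list identity
theorem windows_dup (x : Int) (l : List Int) :
    windows (x :: x :: l) =
      (match l with | z :: _ => [z - x - 1] | [] => []) ++ windows (x :: l) := by
  match l with
  | [] => rfl
  | z :: t => rfl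

-- collapse a leading run of length c ≥ 1 under max0
theorem max0_windows_replicate (c : Nat) (hc : 1 ≤ c) (x : Int) (l : List Int) :
    max0 (windows (List.replicate c x ++ l)) =
      max0 ((if 2 ≤ c ∧ l ≠ [] then [l.headI - x - 1] else []) ++ windows (x :: l)) := by
  match c, hc with
  | 1, _ =>
    have h1 : List.replicate 1 x ++ l = x :: l := by simp
    have h2 : ¬ (2 ≤ 1 ∧ l ≠ []) := by omega
    rw [h1, if_neg h2, List.nil_append]
  | 2, _ =>
    have h1 : List.replicate 2 x ++ l = x :: x :: l := by
      simp [List.replicate_succ]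
    rw [h1, windows_dup]
    cases l with
    | nil => simp
    | cons z t =>
      have h2 : (2 ≤ 2 ∧ (z :: t) ≠ ([] : List Int)) := by simp
      rw [if_pos h2]
      simp [List.headI]
  | (c + 3), _ =>
    have h1 : List.replicate (c + 3) x ++ l = x :: x :: (List.replicate (c + 1) x ++ l) := by
      simp [List.replicate_succ]
    rw [h1, windows_dup]
    have h2 : (match List.replicate (c + 1) x ++ l with
        | z :: _ => [z - x - 1] | [] => ([] : List Int)) = [-1] := by
      rw [List.replicate_succ]
      simp
    have h3 : x :: (List.replicate (c + 1) x ++ l) = List.replicate (c + 2) x ++ l := by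
      rw [show c + 2 = (c + 1) + 1 from rfl]
      simp [List.replicate_succ]
    rw [h2, h3, List.singleton_append, max0_neg_one_cons,
      max0_windows_replicate (c + 2) (by omega) x l]
    by_cases hl : l = []
    · subst hl; simp
    · have e1 : (2 ≤ c + 2 ∧ l ≠ []) := ⟨by omega, hl⟩
      have e2 : (2 ≤ c + 3 ∧ l ≠ []) := ⟨by omega, hl⟩
      rw [if_pos e1, if_pos e2]

-- the main combinatorial lemma: windows of the flattened runs vs the distinct-value scan
theorem max0_windows_flatC (c : Int → Int) (u : List Int) (hc : ∀ v ∈ u, 1 ≤ c v) :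
    max0 (windows (flatC c u)) = max0 (bscan c u) := by
  match u with
  | [] => rfl
  | [x] =>
    have hx : 1 ≤ c x := hc x (by simp)
    have h1 : flatC c [x] = List.replicate (c x).toNat x ++ [] := by simp [flatC]
    rw [h1, max0_windows_replicate (c x).toNat (by omega) x []]
    simp [bscan, windows]
  | x :: y :: t =>
    have hx : 1 ≤ c x := hc x (by simp)
    have hy : 1 ≤ c y := hc y (by simp)
    obtain ⟨m, hm⟩ : ∃ m, (c y).toNat = m + 1 := ⟨(c y).toNat - 1, by omega⟩
    have hL2 : flatC c (y :: t) = y :: (List.replicate m y ++ flatC c t) := by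
      rw [flatC_cons, hm, List.replicate_succ, List.cons_append]
    have hflat : flatC c (x :: y :: t) = List.replicate (c x).toNat x ++ flatC c (y :: t) :=
      flatC_cons c x (y :: t)
    have hIH := max0_windows_flatC c (y :: t) (fun v hv => hc v (by simp [hv]))
    have hhead : (flatC c (y :: t)).headI = y := by rw [hL2]; rfl
    have hne : flatC c (y :: t) ≠ [] := by rw [hL2]; simp
    have h0 : 0 ≤ max0 (bscan c (y :: t)) := max0_nonneg _
    rw [hflat, max0_windows_replicate (c x).toNat (by omega) x (flatC c (y :: t)), bscan_cons]
    by_cases hcy : 1 < c y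
    · obtain ⟨m', rfl⟩ : ∃ m', m = m' + 1 := ⟨m - 1, by omega⟩
      have hL2' : flatC c (y :: t) = y :: y :: (List.replicate m' y ++ flatC c t) := by
        rw [hL2, List.replicate_succ, List.cons_append]
      have hwx : windows (x :: flatC c (y :: t)) = (y - x - 1) :: windows (flatC c (y :: t)) := by
        rw [hL2']; rfl
      rw [hwx, if_pos (Or.inr hcy), if_neg (show ¬ c y = 1 by omega), hhead]
      by_cases hcx : 1 < c x
      · rw [if_pos ⟨by omega, hne⟩]
        simp only [max0_append, max0_cons, max0_nil]
        rw [hIH]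
        omega
      · rw [if_neg (by rintro ⟨h2, -⟩; exact hcx (by omega))]
        simp only [max0_append, max0_cons, max0_nil]
        rw [hIH]
        omega
    · have hcy1 : c y = 1 := by omega
      have hm0 : m = 0 := by omega
      subst hm0
      have hL2' : flatC c (y :: t) = y :: flatC c t := by
        rw [hL2]; simp
      rw [if_pos hcy1]
      match t with
      | [] =>
        have hL2'' : flatC c (y :: ([] : List Int)) = [y] := by
          rw [hL2']; rfl
        have hwx : windows (x :: flatC c (y :: ([] : List Int))) = [] := by
          rw [hL2'']; rfl
        have hwL2 : windows (flatC c (y :: ([] : List Int))) = [] := by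
          rw [hL2'']; rfl
        have hb : max0 (bscan c [y]) = 0 := rfl
        rw [hwx]
        by_cases hcx : 1 < c x
        · rw [if_pos ⟨by omega, hne⟩, if_pos (Or.inl hcx), hhead]
          simp only [max0_append, max0_cons, max0_nil, List.append_nil]
          rw [hb]
          omega
        · rw [if_neg (by rintro ⟨h2, -⟩; exact hcx (by omega)),
            if_neg (by rintro (h | h) <;> omega)]
          simp only [max0_append, max0_nil, List.append_nil]
          rw [hb]
          omega
      | z :: t' =>
        have hz : 1 ≤ c z := hc z (by simp)
        obtain ⟨mz, hmz⟩ : ∃ mz, (c z).toNat = mz + 1 := ⟨(c z).toNat - 1, by omega⟩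
        have hfz : flatC c (z :: t') = z :: (List.replicate mz z ++ flatC c t') := by
          rw [flatC_cons, hmz, List.replicate_succ, List.cons_append]
        have hL2'' : flatC c (y :: z :: t') = y :: z :: (List.replicate mz z ++ flatC c t') := by
          rw [hL2', hfz]
        have hwx : windows (x :: flatC c (y :: z :: t')) =
            (z - x - 1) :: windows (flatC c (y :: z :: t')) := by
          rw [hL2'']; rfl
        rw [hwx]
        by_cases hcx : 1 < c x
        · rw [if_pos ⟨by omega, hne⟩, if_pos (Or.inl hcx), hhead]
          simp only [max0_append, max0_cons, max0_nil]
          rw [hIH]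
          omega
        · rw [if_neg (by rintro ⟨h2, -⟩; exact hcx (by omega)),
            if_neg (by rintro (h | h) <;> omega)]
          simp only [max0_append, max0_cons, max0_nil]
          rw [hIH]
          omega
  termination_by u.length

-- count of a value in flatC over a nodup list
theorem count_flatC (c : Int → Int) (u : List Int) (hnd : u.Nodup) (v : Int) :
    (flatC c u).count v = if v ∈ u then (c v).toNat else 0 := by
  induction u with
  | nil => simp [flatC]
  | cons w u' ih =>
    obtain ⟨hw, hnd'⟩ := List.nodup_cons.1 hnd
    rw [flatC_cons, List.count_append, ih hnd', List.count_replicate]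
    by_cases hvw : v = w
    · subst hvw
      have : v ∉ u' := hw
      simp [this]
    · have : (w == v) = false := by simp [Ne.symm hvw]
      simp [this, hvw]

-- flatC of a pairwise-< list is pairwise ≤
theorem pairwise_le_flatC (c : Int → Int) (u : List Int) (h : u.Pairwise (· < ·)) :
    (flatC c u).Pairwise (· ≤ ·) := by
  induction u with
  | nil => simp [flatC]
  | cons w u' ih =>
    obtain ⟨hw, h'⟩ := List.pairwise_cons.1 h
    rw [flatC_cons, List.pairwise_append]
    refine ⟨List.pairwise_replicate.2 (Or.inr le_rfl), ih h', ?_⟩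
    intro a ha b hb
    obtain ⟨v, hv, hbv⟩ := List.mem_flatMap.1 hb
    rw [List.eq_of_mem_replicate ha, List.eq_of_mem_replicate hbv]
    exact le_of_lt (hw v hv)

-- A's candidate list is exactly `windows` of the sorted list
theorem map_cands_eq (a : List Int) :
    (PySem.List.pyRange 1 ((a.length : Int) - 1)).map
      (fun i => PySem.List.pyGetD a (i + 1) 0 - 1 - (PySem.List.pyGetD a (i - 1) 0 + 1) + 1)
    = windows a := by
  apply List.ext_getElem
  · simp [PySem.List.length_pyRange_one, windows_length]
    omega
  · intro k h1 h2
    have hlen : k + 2 < a.length := by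
      simp [windows_length] at h2
      omega
    have hk : k < (PySem.List.pyRange 1 ((a.length : Int) - 1)).length := by
      simp [PySem.List.length_pyRange_one]; omega
    simp only [List.getElem_map, PySem.List.getElem_pyRange_one 1 ((a.length : Int) - 1) k hk]
    have e1 : PySem.List.pyGetD a ((1 + (k : Int)) + 1) 0 = a[k + 2] := by
      rw [PySem.List.pyGetD_eq_getElem a 0 (by omega) (by omega)]
      congr 1; omega
    have e2 : PySem.List.pyGetD a ((1 + (k : Int)) - 1) 0 = a[k] := by
      rw [PySem.List.pyGetD_eq_getElem a 0 (by omega) (by omega)]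
      congr 1; omega
    rw [e1, e2, windows_getElem a k h2]
    ring

-- A's fold equals max0 of the windows list
theorem solveA_eq_max0_windows (nums : List Int) :
    solve nums = max0 (windows (PySem.List.sorted (nums ++ [0] ++ [100001]) (fun x => x) false)) := by
  unfold solve
  set a := PySem.List.sorted (nums ++ [0] ++ [100001]) (fun x => x) false with ha
  simp only []
  rw [show (fun (longest i : Int) =>
        let lo := PySem.List.pyGetD a (i - 1) 0 + 1
        let hi := PySem.List.pyGetD a (i + 1) 0 - 1
        max longest (hi - lo + 1))
      = (fun longest i => max longest
          ((fun i => PySem.List.pyGetD a (i + 1) 0 - 1 - (PySem.List.pyGetD a (i - 1) 0 + 1) + 1) i))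
      from rfl]
  rw [← List.foldl_map, map_cands_eq a]
  rfl

-- the per-index candidate list of B's loop, over Nat indices
def candN (c : Int → Int) (u : List Int) (k : Nat) : List Int :=
  (if 1 < c (u.getD k 0) ∨ 1 < c (u.getD (k + 1) 0) then
      [u.getD (k + 1) 0 - u.getD k 0 - 1] else []) ++
  (if c (u.getD (k + 1) 0) = 1 ∧ k + 2 < u.length then
      [u.getD (k + 2) 0 - u.getD k 0 - 1] else [])

theorem flatMap_candN_eq (c : Int → Int) (u : List Int) :
    (List.range (u.length - 1)).flatMap (candN c u) = bscan c u := by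
  match u with
  | [] => rfl
  | [x] => rfl
  | x :: y :: t =>
    have hlen : (x :: y :: t).length - 1 = t.length + 1 := by simp
    rw [hlen, List.range_succ_eq_map, List.flatMap_cons, List.flatMap_map]
    have hs : ∀ k ∈ List.range t.length,
        candN c (x :: y :: t) (Nat.succ k) = candN c (y :: t) k := by
      intro k _
      simp only [candN, Nat.succ_eq_add_one, List.getD_cons_succ, List.length_cons]
      congr 1
      exact if_congr (and_congr_right' (by omega)) rfl rfl
    rw [List.flatMap_congr hs,
      show List.range t.length = List.range ((y :: t).length - 1) from by simp,
      flatMap_candN_eq c (y :: t)]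
    match t with
    | [] =>
      simp only [candN, List.getD_cons_zero, List.getD_cons_succ, bscan_cons]
      by_cases hcy : c y = 1
      · simp [hcy, bscan]
      · simp [hcy, bscan]
    | z :: t' =>
      simp only [candN, List.getD_cons_zero, List.getD_cons_succ, bscan_cons]
      by_cases hcy : c y = 1
      · simp [hcy]
      · simp [hcy]
  termination_by u.length

-- B's loop equals max0 of bscan, for any count function c
theorem solveB_bridge (c : Int → Int) (u : List Int) :
    (PySem.List.pyRange 0 ((u.length : Int) - 1) 1).foldl
      (fun best j =>
        let x := PySem.List.pyGetD u j 0
        let y := PySem.List.pyGetD u (j + 1) 0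
        let best1 := if 1 < c x ∨ 1 < c y then max best (y - x - 1) else best
        if c y = 1 ∧ j + 2 < (u.length : Int) then
          max best1 (PySem.List.pyGetD u (j + 2) 0 - x - 1)
        else best1) 0
    = max0 (bscan c u) := by
  cases u with
  | nil =>
    have h1 : ((([] : List Int).length : Int) - 1) = -1 := by simp
    rw [h1, show PySem.List.pyRange 0 (-1) 1 = [] from by decide]
    rfl
  | cons w t =>
    have h1 : (((w :: t).length : Int) - 1) = ((t.length : Nat) : Int) := by
      simp
    rw [h1, PySem.List.pyRange_zero_natCast, List.foldl_map]
    have hb : (fun (best : Int) (k : Nat) =>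
        (fun best j =>
          let x := PySem.List.pyGetD (w :: t) j 0
          let y := PySem.List.pyGetD (w :: t) (j + 1) 0
          let best1 := if 1 < c x ∨ 1 < c y then max best (y - x - 1) else best
          if c y = 1 ∧ j + 2 < ((w :: t).length : Int) then
            max best1 (PySem.List.pyGetD (w :: t) (j + 2) 0 - x - 1)
          else best1) best ((k : Nat) : Int))
        = (fun best k => List.foldl max best (candN c (w :: t) k)) := by
      funext best k
      have g0 : PySem.List.pyGetD (w :: t) ((k : Nat) : Int) 0 = (w :: t).getD k 0 :=
        PySem.List.pyGetD_natCast _ _ _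
      have g1 : PySem.List.pyGetD (w :: t) (((k : Nat) : Int) + 1) 0 = (w :: t).getD (k + 1) 0 := by
        rw [show (((k : Nat) : Int) + 1) = (((k + 1 : Nat) : Nat) : Int) by push_cast; ring]
        exact PySem.List.pyGetD_natCast _ _ _
      have g2 : PySem.List.pyGetD (w :: t) (((k : Nat) : Int) + 2) 0 = (w :: t).getD (k + 2) 0 := by
        rw [show (((k : Nat) : Int) + 2) = (((k + 2 : Nat) : Nat) : Int) by push_cast; ring]
        exact PySem.List.pyGetD_natCast _ _ _
      have gcond : (((k : Nat) : Int) + 2 < (((w :: t).length : Nat) : Int)) =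
          (k + 2 < (w :: t).length) := propext (by omega)
      simp only [g0, g1, g2, gcond, candN]
      split_ifs <;> rfl
    rw [hb, ← List.foldl_flatMap]
    rw [show t.length = (w :: t).length - 1 from by simp]
    rw [flatMap_candN_eq]
    rfl

-- B's program equals max0 of bscan over the sorted distinct values with real counts
theorem solveB_eq_max0_bscan (nums : List Int) :
    solve_alt nums =
      max0 (bscan (fun v => (List.count v (nums ++ [0, 100001]) : Int))
        (PySem.List.sorted (PySem.Set.ofList (nums ++ [0, 100001])) (fun x => x) false)) := by
  unfold solve_alt
  simp only [PySem.Dict.foldl_insert_getD_add_one_eq_counter, PySem.Dict.keys_counter,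
    PySem.Dict.getD_counter]
  exact solveB_bridge (fun v => (List.count v (nums ++ [0, 100001]) : Int))
    (PySem.List.sorted (PySem.Set.ofList (nums ++ [0, 100001])) (fun x => x) false)

-- the sorted multiset is the flattening of the sorted distinct values with their counts
theorem sorted_eq_flatC (nums : List Int) :
    PySem.List.sorted (nums ++ [0] ++ [100001]) (fun x => x) false =
      flatC (fun v => (List.count v (nums ++ [0, 100001]) : Int))
        (PySem.List.sorted (PySem.Set.ofList (nums ++ [0, 100001])) (fun x => x) false) := by
  have hL : nums ++ [0] ++ [100001] = nums ++ [0, 100001] := by simp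
  set c : Int → Int := fun v => (List.count v (nums ++ [0, 100001]) : Int) with hcdef
  set u := PySem.List.sorted (PySem.Set.ofList (nums ++ [0, 100001])) (fun x => x) false with hu
  have hlt : u.Pairwise (· < ·) := PySem.List.sorted_ofList_pairwise_lt (nums ++ [0, 100001])
  have hnd : u.Nodup := hlt.imp ne_of_lt
  have hmem : ∀ a : Int, a ∈ u ↔ a ∈ nums ++ [0, 100001] := by
    intro a
    rw [hu, PySem.List.mem_sorted, PySem.Set.mem_ofList]
  have hperm : (flatC c u).Perm (nums ++ [0, 100001]) := by
    rw [List.perm_iff_count]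
    intro a
    rw [count_flatC c u hnd a]
    by_cases ha : a ∈ u
    · rw [if_pos ha, hcdef]
      simp only [Int.toNat_natCast]
    · rw [if_neg ha]
      exact (List.count_eq_zero.2 (fun h => ha ((hmem a).2 h))).symm
  rw [hL]
  exact PySem.List.sorted_id_eq_of_perm_of_pairwise (nums ++ [0, 100001]) (flatC c u) hperm
    (pairwise_le_flatC c u hlt)

-- ===== VERDICT (by name: the statement is the Claim_ definition above) =====
theorem solve_spec : Claim_equal_solve := by
  intro nums _
  unfold Spec_solve
  rw [solveA_eq_max0_windows, solveB_eq_max0_bscan, sorted_eq_flatC]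
  apply max0_windows_flatC
  intro v hv
  simp only [PySem.List.mem_sorted, PySem.Set.mem_ofList] at hv
  have : 1 ≤ List.count v (nums ++ [0, 100001]) := List.count_pos_iff.2 hv
  exact_mod_cast this
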